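-- pv_equiv track=rewrite | github.com/dileepajay/image_text_crop_adjust | image_crop_adjust.py | get_darkest_average_color
-- ===== SOURCE A (Python) =====
-- def get_darkest_average_color(image_data, x, y, w, h):
--     """
--     Finds the darkest average color in the sub-rectangle.
--     Returns an int in [0..255].
--     """
--     width  = len(image_data)
--     height = len(image_data[0])
--
--     total = 0
--     count = 0
--     min_gray = 255
--
--     # Loop through the requested rect
--     for yy in range(y, y + h):
--         if yy < 0 or yy >= height:
--             continue
--         for xx in range(x, x + w):
--             if xx < 0 or xx >= width:
--                 continue
--             val = image_data[xx][yy]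
--             total += val
--             count += 1
--             if val < min_gray:
--                 min_gray = val
--
--     avg = (total // count) if count > 0 else 0
--     # return the darker of the min or the average
--     return min(avg, min_gray)
-- ===== SOURCE B (Python) =====
-- def get_darkest_average_color(image_data, x, y, w, h):
--     """
--     Finds the darkest average color in the sub-rectangle.
--     Returns an int in [0..255].
--     """
--     width = len(image_data)
--     height = len(image_data[0])
--     # Clamp the rectangle to the image once, then walk it column-by-column
--     # with slices (transposed order w.r.t. a row-major double loop; the
--     # result only depends on the multiset of values, so order is irrelevant).
--     x0, x1 = max(x, 0), min(x + w, width)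
--     y0, y1 = max(y, 0), min(y + h, height)
--     vals = []
--     if x0 < x1 and y0 < y1:
--         for column in image_data[x0:x1]:
--             vals.extend(column[y0:y1])
--     count = len(vals)
--     avg = sum(vals) // count if count > 0 else 0
--     # darker of the average, the 255 cap and every value
--     return min([avg, 255] + vals)
-- ===== Notes on version B (the rewrite author's own statement) =====
-- stated objective: alternative
-- what changed: B clamps the rectangle to the image once and traverses it transposed (column-by-column) with Python slices instead of A's row-major double loop with per-pixel bound checks, then computes count/sum via staged reductions and one min over [avg,255]+vals in place of A's fused three-accumulator loop; the result only depends on the multiset of in-bounds values, so the transposed order is sound.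
import Mathlib
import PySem

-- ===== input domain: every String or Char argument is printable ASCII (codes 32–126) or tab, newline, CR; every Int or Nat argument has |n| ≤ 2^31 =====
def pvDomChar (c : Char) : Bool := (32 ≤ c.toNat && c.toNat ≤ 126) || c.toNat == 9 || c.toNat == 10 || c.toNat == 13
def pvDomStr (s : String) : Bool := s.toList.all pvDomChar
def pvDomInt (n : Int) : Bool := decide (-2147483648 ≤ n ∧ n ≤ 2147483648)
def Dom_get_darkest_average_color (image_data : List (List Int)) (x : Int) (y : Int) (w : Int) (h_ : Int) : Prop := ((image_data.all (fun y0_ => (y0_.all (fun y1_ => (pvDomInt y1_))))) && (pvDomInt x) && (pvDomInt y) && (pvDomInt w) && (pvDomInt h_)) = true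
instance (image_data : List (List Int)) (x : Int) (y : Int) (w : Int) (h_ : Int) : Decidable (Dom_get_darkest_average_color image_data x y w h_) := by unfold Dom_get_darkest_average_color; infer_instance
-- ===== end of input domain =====

-- B clamps the rectangle once and walks it transposed via slices with staged sum/len/min
-- reductions, instead of A's row-major double loop with per-pixel bound checks and three
-- fused accumulators; objective: alternative (same cost, different traversal and decomposition).

-- ===== PORT A =====
def get_darkest_average_color (image_data : List (List Int)) (x : Int) (y : Int) (w : Int) (h_ : Int) : Int :=
  let width : Int := image_data.length
  let height : Int := (image_data.headD []).length
  let st : Int × Int × Int :=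
    (PySem.List.pyRange y (y + h_) 1).foldl (fun (st : Int × Int × Int) yy =>
      if yy < 0 ∨ height ≤ yy then st
      else (PySem.List.pyRange x (x + w) 1).foldl (fun (st : Int × Int × Int) xx =>
        if xx < 0 ∨ width ≤ xx then st
        else
          let val := (PySem.List.pyGet? ((PySem.List.pyGet? image_data xx).getD []) yy).getD 0
          (st.1 + val, st.2.1 + 1, if val < st.2.2 then val else st.2.2)) st)
      (0, 0, 255)
  let avg : Int := if st.2.1 > 0 then PySem.Int.floordiv st.1 st.2.1 else 0
  min avg st.2.2

-- ===== PORT B =====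
def get_darkest_average_color_alt (image_data : List (List Int)) (x : Int) (y : Int) (w : Int) (h_ : Int) : Int :=
  let width : Int := image_data.length
  let height : Int := (image_data.headD []).length
  let x0 : Int := max x 0
  let x1 : Int := min (x + w) width
  let y0 : Int := max y 0
  let y1 : Int := min (y + h_) height
  let vals : List Int :=
    if x0 < x1 ∧ y0 < y1 then
      (PySem.List.slice image_data (some x0) (some x1)).foldl
        (fun acc col => acc ++ PySem.List.slice col (some y0) (some y1)) []
    else []
  let count : Int := vals.length
  let avg : Int := if count > 0 then PySem.Int.floordiv vals.sum count else 0
  (PySem.List.min? (avg :: 255 :: vals) (fun v => v)).getD 0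

-- ===== PRECONDITION & SPEC =====
-- Pre_ excludes exactly the inputs where the Python A raises IndexError: empty image_data
-- (len(image_data[0])), and ragged column lists too short for an actually accessed row index yy.
def Pre_get_darkest_average_color (image_data : List (List Int)) (x : Int) (y : Int) (w : Int) (h_ : Int) : Prop :=
  image_data ≠ [] ∧
  (max y 0 < min (y + h_) ((image_data.headD []).length : Int) →
    ∀ xx ∈ PySem.List.pyRange (max x 0) (min (x + w) (image_data.length : Int)) 1,
      min (y + h_) ((image_data.headD []).length : Int) ≤ (((PySem.List.pyGet? image_data xx).getD []).length : Int))
instance (image_data : List (List Int)) (x : Int) (y : Int) (w : Int) (h_ : Int) : Decidable (Pre_get_darkest_average_color image_data x y w h_) := by unfold Pre_get_darkest_average_color; infer_instance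

def pvWitness_get_darkest_average_color : List (List Int) × Int × Int × Int × Int := ([[7, 9], [3, 5]], 0, 0, 2, 2)

def Spec_get_darkest_average_color (image_data : List (List Int)) (x : Int) (y : Int) (w : Int) (h_ : Int) (out : Int) : Prop := out = get_darkest_average_color_alt image_data x y w h_
instance (image_data : List (List Int)) (x : Int) (y : Int) (w : Int) (h_ : Int) (out : Int) : Decidable (Spec_get_darkest_average_color image_data x y w h_ out) := by unfold Spec_get_darkest_average_color; infer_instance

-- ===== CLAIM (what is proved, stated in full; the proofs are below) =====
def Claim_equal_get_darkest_average_color : Prop := ∀ (image_data : List (List Int)) (x : Int) (y : Int) (w : Int) (h_ : Int), Dom_get_darkest_average_color image_data x y w h_ → Pre_get_darkest_average_color image_data x y w h_ → Spec_get_darkest_average_color image_data x y w h_ (get_darkest_average_color image_data x y w h_)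
-- ===== LEMMAS AND PROOFS =====

-- `if v < m then v else m` is `min m v`
lemma ite_lt_eq_min (v m : Int) : (if v < m then v else m) = min m v := by
  rw [min_def]; split_ifs <;> omega

-- A's inner loop over one row equals three reductions over the filtered+mapped values
lemma inner_fold_eq (xs : List Int) (width : Int) (val : Int → Int) :
    ∀ (t c m : Int),
      xs.foldl (fun (st : Int × Int × Int) xx =>
        if xx < 0 ∨ width ≤ xx then st
        else (st.1 + val xx, st.2.1 + 1, if val xx < st.2.2 then val xx else st.2.2)) (t, c, m)
      = (t + ((xs.filter (fun xx => decide (0 ≤ xx) && decide (xx < width))).map val).sum,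
         c + ((xs.filter (fun xx => decide (0 ≤ xx) && decide (xx < width))).map val).length,
         ((xs.filter (fun xx => decide (0 ≤ xx) && decide (xx < width))).map val).foldl min m) := by
  induction xs with
  | nil => intro t c m; simp
  | cons a xs ih =>
    intro t c m
    by_cases ha : a < 0 ∨ width ≤ a
    · have hfa : (decide (0 ≤ a) && decide (a < width)) = false := by
        simp only [Bool.and_eq_false_iff, decide_eq_false_iff_not, not_le, not_lt]
        omega
      simp only [List.foldl_cons, if_pos ha, List.filter_cons, hfa]
      exact ih t c m
    · have hfa : (decide (0 ≤ a) && decide (a < width)) = true := by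
        simp only [Bool.and_eq_true, decide_eq_true_eq]
        omega
      simp only [List.foldl_cons, if_neg ha, List.filter_cons, hfa, if_pos, List.map_cons,
        List.sum_cons, List.length_cons, List.foldl_cons]
      rw [ih]
      refine Prod.ext ?_ (Prod.ext ?_ ?_) <;> simp [ite_lt_eq_min]
      · ring
      · ring

-- A's whole nested loop equals three reductions over the row-major value list
lemma outer_fold_eq (ys xs : List Int) (width height : Int) (val : Int → Int → Int) :
    ∀ (t c m : Int),
      ys.foldl (fun (st : Int × Int × Int) yy =>
        if yy < 0 ∨ height ≤ yy then st
        else xs.foldl (fun (st : Int × Int × Int) xx =>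
          if xx < 0 ∨ width ≤ xx then st
          else (st.1 + val xx yy, st.2.1 + 1, if val xx yy < st.2.2 then val xx yy else st.2.2)) st) (t, c, m)
      = (t + ((ys.filter (fun yy => decide (0 ≤ yy) && decide (yy < height))).flatMap
              (fun yy => (xs.filter (fun xx => decide (0 ≤ xx) && decide (xx < width))).map (fun xx => val xx yy))).sum,
         c + ((ys.filter (fun yy => decide (0 ≤ yy) && decide (yy < height))).flatMap
              (fun yy => (xs.filter (fun xx => decide (0 ≤ xx) && decide (xx < width))).map (fun xx => val xx yy))).length,
         ((ys.filter (fun yy => decide (0 ≤ yy) && decide (yy < height))).flatMap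
              (fun yy => (xs.filter (fun xx => decide (0 ≤ xx) && decide (xx < width))).map (fun xx => val xx yy))).foldl min m) := by
  induction ys with
  | nil => intro t c m; simp
  | cons a ys ih =>
    intro t c m
    by_cases ha : a < 0 ∨ height ≤ a
    · have hfa : (decide (0 ≤ a) && decide (a < height)) = false := by
        simp only [Bool.and_eq_false_iff, decide_eq_false_iff_not, not_le, not_lt]
        omega
      simp only [List.foldl_cons, if_pos ha, List.filter_cons, hfa]
      exact ih t c m
    · have hfa : (decide (0 ≤ a) && decide (a < height)) = true := by
        simp only [Bool.and_eq_true, decide_eq_true_eq]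
        omega
      simp only [List.foldl_cons, if_neg ha, List.filter_cons, hfa, if_pos, List.flatMap_cons]
      rw [inner_fold_eq xs width (fun xx => val xx a) t c m, ih]
      refine Prod.ext ?_ (Prod.ext ?_ ?_) <;>
        simp [List.sum_append, List.length_append, List.foldl_append]
      · ring
      · ring

lemma foldl_min_init (l : List Int) : ∀ (a b : Int), l.foldl min (min a b) = min a (l.foldl min b) := by
  induction l with
  | nil => intro a b; rfl
  | cons c l ih =>
    intro a b
    simp only [List.foldl_cons, min_assoc, ih]

-- the in-bounds filter of a range is the clamped range
lemma filter_pyRange_clamp (a b n : Int) :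
    (PySem.List.pyRange a b 1).filter (fun t => decide (0 ≤ t) && decide (t < n))
      = PySem.List.pyRange (max a 0) (min b n) 1 := by
  by_cases h : max a 0 < min b n
  · have h1 : a ≤ max a 0 := le_max_left _ _
    have h2 : max a 0 ≤ min b n := le_of_lt h
    have h3 : min b n ≤ b := min_le_left _ _
    rw [PySem.List.pyRange_one_append a (max a 0) b h1 (le_trans h2 h3),
        PySem.List.pyRange_one_append (max a 0) (min b n) b h2 h3,
        List.filter_append, List.filter_append]
    have e1 : (PySem.List.pyRange a (max a 0) 1).filter (fun t => decide (0 ≤ t) && decide (t < n)) = [] := by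
      rw [List.filter_eq_nil_iff]
      intro t ht
      have := (PySem.List.mem_pyRange_one).mp ht
      simp only [Bool.and_eq_true, decide_eq_true_eq, not_and]
      omega
    have e2 : (PySem.List.pyRange (max a 0) (min b n) 1).filter (fun t => decide (0 ≤ t) && decide (t < n)) = PySem.List.pyRange (max a 0) (min b n) 1 := by
      rw [List.filter_eq_self]
      intro t ht
      have := (PySem.List.mem_pyRange_one).mp ht
      simp only [Bool.and_eq_true, decide_eq_true_eq]
      omega
    have e3 : (PySem.List.pyRange (min b n) b 1).filter (fun t => decide (0 ≤ t) && decide (t < n)) = [] := by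
      rw [List.filter_eq_nil_iff]
      intro t ht
      have := (PySem.List.mem_pyRange_one).mp ht
      simp only [Bool.and_eq_true, decide_eq_true_eq, not_and]
      omega
    rw [e1, e2, e3, List.nil_append, List.append_nil]
  · rw [PySem.List.pyRange_one_eq_nil (by omega : min b n ≤ max a 0), List.filter_eq_nil_iff]
    intro t ht
    have := (PySem.List.mem_pyRange_one).mp ht
    simp only [Bool.and_eq_true, decide_eq_true_eq, not_and]
    omega

-- indexing a clamped range is the slice
lemma mapRange_eq_slice {α : Type} (xs : List α) (a b : Int) (d : α)
    (h0 : 0 ≤ a) (hab : a ≤ b) (hb : b ≤ (xs.length : Int)) :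
    (PySem.List.pyRange a b 1).map (fun j => (PySem.List.pyGet? xs j).getD d)
      = PySem.List.slice xs (some a) (some b) := by
  rw [PySem.List.slice_toNat xs h0 (le_trans h0 hab), PySem.List.pyRange_one, List.map_map]
  apply List.ext_getElem
  · simp
    omega
  · intro i hi1 hi2
    simp only [List.getElem_map, List.getElem_range, Function.comp_apply, List.getElem_take,
      List.getElem_drop]
    have hlen : i < (b - a).toNat := by simpa using hi1
    have hin : 0 ≤ a + (i : Int) ∧ a + (i : Int) < (xs.length : Int) := by omega
    rw [PySem.List.pyGet?_eq_some_getElem xs hin.1 hin.2, Option.getD_some]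
    congr 1
    omega

-- pulling the head of each flatMap block to the front is a permutation
lemma flatMap_cons_perm {α β : Type} (xs : List α) (g : α → β) (h : α → List β) :
    (xs.flatMap (fun x => g x :: h x)).Perm (xs.map g ++ xs.flatMap h) := by
  induction xs with
  | nil => simp
  | cons a xs ih =>
    simp only [List.flatMap_cons, List.map_cons, List.cons_append]
    refine List.Perm.cons _ ?_
    have h1 : (h a ++ xs.flatMap (fun x => g x :: h x)).Perm (h a ++ (xs.map g ++ xs.flatMap h)) :=
      List.Perm.append_left _ ih
    have h2 : (h a ++ (xs.map g ++ xs.flatMap h)).Perm (xs.map g ++ (h a ++ xs.flatMap h)) := by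
      rw [← List.append_assoc, ← List.append_assoc]
      exact List.Perm.append_right _ List.perm_append_comm
    exact h1.trans h2

-- transposing the nested traversal is a permutation
lemma perm_swap (ys xs : List Int) (f : Int → Int → Int) :
    (ys.flatMap (fun yy => xs.map (fun xx => f xx yy))).Perm
      (xs.flatMap (fun xx => ys.map (fun yy => f xx yy))) := by
  induction ys with
  | nil => simp
  | cons a ys ih =>
    simp only [List.flatMap_cons, List.map_cons]
    refine List.Perm.trans ?_ (flatMap_cons_perm xs (fun xx => f xx a) (fun xx => ys.map (fun yy => f xx yy))).symm
    exact List.Perm.append_left _ ih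

lemma flatMap_congr_mem {α β : Type} (l : List α) (f g : α → List β)
    (h : ∀ x ∈ l, f x = g x) : l.flatMap f = l.flatMap g := by
  induction l with
  | nil => rfl
  | cons a l ih =>
    simp only [List.flatMap_cons, h a List.mem_cons_self,
      ih (fun x hx => h x (List.mem_cons_of_mem _ hx))]

-- ===== VERDICT (by name: the statement is the Claim_ definition above) =====
theorem get_darkest_average_color_spec : Claim_equal_get_darkest_average_color := by
  intro img x y w h_ _ hpre
  obtain ⟨hne, hrag⟩ := hpre
  unfold Spec_get_darkest_average_color get_darkest_average_color get_darkest_average_color_alt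
  dsimp only
  rw [outer_fold_eq (PySem.List.pyRange y (y + h_) 1) (PySem.List.pyRange x (x + w) 1)
      (img.length : Int) ((img.headD []).length : Int)
      (fun xx yy => (PySem.List.pyGet? ((PySem.List.pyGet? img xx).getD []) yy).getD 0) 0 0 255]
  rw [filter_pyRange_clamp y (y + h_) ((img.headD []).length : Int),
      filter_pyRange_clamp x (x + w) (img.length : Int)]
  by_cases hg : max x 0 < min (x + w) (img.length : Int) ∧
      max y 0 < min (y + h_) ((img.headD []).length : Int)
  · rw [if_pos hg, PySem.List.foldl_append_eq_flatMap, List.nil_append]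
    have hx : ((PySem.List.pyRange (max x 0) (min (x + w) (img.length : Int)) 1).map
          (fun j => (PySem.List.pyGet? img j).getD []))
        = PySem.List.slice img (some (max x 0)) (some (min (x + w) (img.length : Int))) :=
      mapRange_eq_slice img _ _ [] (le_max_right _ _) (le_of_lt hg.1) (min_le_right _ _)
    have hperm :
        ((PySem.List.pyRange (max y 0) (min (y + h_) ((img.headD []).length : Int)) 1).flatMap
          (fun yy => (PySem.List.pyRange (max x 0) (min (x + w) (img.length : Int)) 1).map
            (fun xx => (PySem.List.pyGet? ((PySem.List.pyGet? img xx).getD []) yy).getD 0))).Perm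
        ((PySem.List.slice img (some (max x 0)) (some (min (x + w) (img.length : Int)))).flatMap
          (fun col => PySem.List.slice col (some (max y 0)) (some (min (y + h_) ((img.headD []).length : Int))))) := by
      refine (perm_swap _ _ _).trans ?_
      have hrows : (PySem.List.pyRange (max x 0) (min (x + w) (img.length : Int)) 1).flatMap
            (fun xx => (PySem.List.pyRange (max y 0) (min (y + h_) ((img.headD []).length : Int)) 1).map
              (fun yy => (PySem.List.pyGet? ((PySem.List.pyGet? img xx).getD []) yy).getD 0))
          = (PySem.List.pyRange (max x 0) (min (x + w) (img.length : Int)) 1).flatMap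
            (fun xx => PySem.List.slice ((PySem.List.pyGet? img xx).getD [])
              (some (max y 0)) (some (min (y + h_) ((img.headD []).length : Int)))) := by
        refine flatMap_congr_mem _ _ _ ?_
        intro xx hxx
        exact mapRange_eq_slice _ _ _ 0 (le_max_right _ _) (le_of_lt hg.2) (hrag hg.2 xx hxx)
      rw [hrows, ← hx, List.flatMap_map]
    have hsum := hperm.sum_eq
    have hlen := hperm.length_eq
    have hmin := hperm.foldl_eq (f := min) 255
    rw [PySem.List.min?_id_cons, Option.getD_some, List.foldl_cons, foldl_min_init,
        hsum, hlen, hmin]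
    simp only [zero_add]
  · rw [if_neg hg]
    have hA :
        ((PySem.List.pyRange (max y 0) (min (y + h_) ((img.headD []).length : Int)) 1).flatMap
          (fun yy => (PySem.List.pyRange (max x 0) (min (x + w) (img.length : Int)) 1).map
            (fun xx => (PySem.List.pyGet? ((PySem.List.pyGet? img xx).getD []) yy).getD 0))) = [] := by
      rcases not_and_or.mp hg with hcx | hcy
      · have hx0 : PySem.List.pyRange (max x 0) (min (x + w) (img.length : Int)) 1 = [] :=
          PySem.List.pyRange_one_eq_nil (by omega)
        simp [hx0]
      · have hy0 : PySem.List.pyRange (max y 0) (min (y + h_) ((img.headD []).length : Int)) 1 = [] :=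
          PySem.List.pyRange_one_eq_nil (by omega)
        rw [hy0, List.flatMap_nil]
    rw [hA, PySem.List.min?_id_cons, Option.getD_some]
    norm_num
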